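-- pv_equiv track=rewrite | github.com/devforfu/codility | disks.py | solution_copy
-- ===== SOURCE A (Python) =====
-- def solution_copy(a):
--     import bisect
--     cuts = [(c - r, c + r) for c, r in enumerate(a)]
--     cuts.sort(key=lambda pair: pair[0])
--     lefts, rights = zip(*cuts)
--     n = len(cuts)
--     total = 0
--     for i in range(n):
--         r = rights[i]
--         pos = bisect.bisect_right(lefts[i+1:], r)
--         total += pos
--         if total > 10e7:
--             return -1
--     return total
-- ===== SOURCE B (Python) =====
-- def solution_copy(a):
--     cuts = sorted(((c - r, c + r) for c, r in enumerate(a)), key=lambda p: p[0])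
--     n = len(cuts)
--     lefts = [p[0] for p in cuts]
--     rights = [p[1] for p in cuts]
--     total = 0
--     j = 0
--     for i, r in sorted(enumerate(rights), key=lambda p: p[1]):
--         while j < n and lefts[j] <= r:
--             j += 1
--         total += max(j - i - 1, 0)
--     return -1 if total > 10e7 else total
-- ===== Notes on version B (the rewrite author's own statement) =====
-- stated objective: faster
-- what changed: A runs a binary search over a freshly sliced copy of the sorted left endpoints for every disk (the slicing alone is quadratic); B sorts the right endpoints once and advances a single monotone pointer over the sorted left endpoints, accumulating max(j - i - 1, 0) per disk.
import Mathlib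
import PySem

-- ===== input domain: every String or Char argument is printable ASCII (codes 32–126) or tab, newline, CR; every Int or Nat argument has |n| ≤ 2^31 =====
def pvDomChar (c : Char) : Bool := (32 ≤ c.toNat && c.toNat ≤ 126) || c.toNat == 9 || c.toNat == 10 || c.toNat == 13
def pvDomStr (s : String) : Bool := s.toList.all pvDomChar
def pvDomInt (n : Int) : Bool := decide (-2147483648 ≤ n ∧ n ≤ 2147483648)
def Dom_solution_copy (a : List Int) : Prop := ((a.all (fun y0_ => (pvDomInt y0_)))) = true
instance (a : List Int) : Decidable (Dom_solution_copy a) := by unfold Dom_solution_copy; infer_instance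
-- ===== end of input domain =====

-- B replaces A's per-disk binary search over a fresh slice (O(n^2) from the slicing
-- alone) by one sort of the right endpoints and a single two-pointer sweep over the
-- sorted left endpoints (objective: faster).

-- ===== PORT A =====
-- the 'for i in range(n): … total += pos; if total > 10e7: return -1' loop of A
-- (10e7 = 1e8; Python's 'int > float' compare is exact here, ported as > 100000000)
def aLoop (lefts rights : List Int) (n : Nat) (i : Nat) (total : Int) : Int :=
  if i < n then
    let r := PySem.List.pyGetD rights (i : Int) 0              -- rights[i], in range for i < n
    let pos := PySem.List.bisectRight (PySem.List.slice lefts (some ((i : Int) + 1)) none) r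
    let total' := total + (pos : Int)
    if total' > 100000000 then -1
    else aLoop lefts rights n (i + 1) total'
  else total
termination_by n - i

-- 'lefts, rights = zip(*cuts)' raises ValueError on the empty list (excluded by
-- Pre_); on nonempty cuts it is the pair of component lists, ported as two maps.
def solution_copy (a : List Int) : Int :=
  let cuts := PySem.List.sorted
    ((PySem.List.enumerate a).map (fun cr => (cr.1 - cr.2, cr.1 + cr.2))) (fun p => p.1)
  let lefts := cuts.map Prod.fst
  let rights := cuts.map Prod.snd
  let n := cuts.length
  aLoop lefts rights n 0 0

-- ===== PORT B =====
-- 'while j < n and lefts[j] <= r: j += 1' (j stays in range, so lefts[j] is getD)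
def whileAdv (lefts : List Int) (n : Nat) (r : Int) (j : Nat) : Nat :=
  if h : j < n ∧ lefts.getD j 0 ≤ r then whileAdv lefts n r (j + 1) else j
termination_by n - j
decreasing_by omega

def solution_copy_alt (a : List Int) : Int :=
  let cuts := PySem.List.sorted
    ((PySem.List.enumerate a).map (fun cr => (cr.1 - cr.2, cr.1 + cr.2))) (fun p => p.1)
  let n := cuts.length
  let lefts := cuts.map (fun p => p.1)
  let rights := cuts.map (fun p => p.2)
  let st := (PySem.List.sorted (PySem.List.enumerate rights) (fun p => p.2)).foldl
    (fun (st : Nat × Int) ir =>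
      let j := whileAdv lefts n ir.2 st.1
      (j, st.2 + max ((j : Int) - ir.1 - 1) 0)) (0, 0)
  if st.2 > 100000000 then -1 else st.2

-- ===== PRECONDITION & SPEC =====
-- A raises ValueError on the empty list ('zip(*cuts)' unpacks nothing); that is the
-- only input A raises on, so Pre_ excludes exactly it.
def Pre_solution_copy (a : List Int) : Prop := a ≠ []
instance (a : List Int) : Decidable (Pre_solution_copy a) := by unfold Pre_solution_copy; infer_instance
def pvWitness_solution_copy : List Int := [2, -1, 0, 3]

def Spec_solution_copy (a : List Int) (out : Int) : Prop := out = solution_copy_alt a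
instance (a : List Int) (out : Int) : Decidable (Spec_solution_copy a out) := by unfold Spec_solution_copy; infer_instance

-- ===== CLAIM (what is proved, stated in full; the proofs are below) =====
def Claim_equal_solution_copy : Prop := ∀ (a : List Int), Dom_solution_copy a → Pre_solution_copy a → Spec_solution_copy a (solution_copy a)

-- ===== LEMMAS AND PROOFS =====

-- number of elements of L that are ≤ x (what both loops really count)
def cnt (L : List Int) (x : Int) : Nat := L.countP (fun y => decide (y ≤ x))

theorem cnt_le_length (L : List Int) (x : Int) : cnt L x ≤ L.length :=
  List.countP_le_length

theorem cnt_mono (L : List Int) {x y : Int} (h : x ≤ y) : cnt L x ≤ cnt L y :=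
  List.countP_mono_left (fun a _ ha => by simp_all; omega)

-- on a sorted list, the elements ≤ x are exactly the first (cnt L x) ones
theorem cnt_iff (L : List Int) (r : Int) (hs : L.Pairwise (· ≤ ·)) :
    ∀ j (h : j < L.length), (L[j] ≤ r ↔ j < cnt L r) := by
  induction L with
  | nil => intro j h; simp at h
  | cons x t ih =>
    rcases List.pairwise_cons.mp hs with ⟨hx, ht⟩
    intro j hj
    by_cases hxr : x ≤ r
    · have hc : cnt (x :: t) r = cnt t r + 1 := by
        simp [cnt, hxr]
      cases j with
      | zero => simpa [hc] using hxr
      | succ j =>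
        have := ih ht j (by simpa using hj)
        simpa [hc] using this
    · have hzero : cnt t r = 0 := by
        refine List.countP_eq_zero.mpr ?_
        intro y hy
        have := hx y hy
        simp only [decide_eq_true_eq]
        omega
      have hc : cnt (x :: t) r = 0 := by
        simp [cnt, hxr] at *
        simpa [cnt] using hzero
      cases j with
      | zero => simp [hc, hxr]
      | succ j =>
        have hj2 : j < t.length := by simpa using hj
        have hmem : t[j] ∈ t := List.getElem_mem _
        have := hx _ hmem
        simp only [hc, List.getElem_cons_succ]
        constructor
        · intro hle; omega
        · intro hlt; omega

theorem bisect_eq_cnt (L : List Int) (r : Int) (hs : L.Pairwise (· ≤ ·)) :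
    PySem.List.bisectRight L r = cnt L r := by
  obtain ⟨hble, hlt, hgt⟩ := PySem.List.bisectRight_spec L r hs
  set b := PySem.List.bisectRight L r with hb
  have hcle := cnt_le_length L r
  rcases lt_trichotomy b (cnt L r) with h | h | h
  · exfalso
    have hblen : b < L.length := lt_of_lt_of_le h hcle
    have := hgt b hblen le_rfl
    have := (cnt_iff L r hs b hblen).mpr h
    omega
  · exact h
  · exfalso
    have hclen : cnt L r < L.length := lt_of_lt_of_le h hble
    have := hlt (cnt L r) hclen h
    have := (cnt_iff L r hs (cnt L r) hclen).mp this
    omega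

theorem cnt_drop (L : List Int) (r : Int) (hs : L.Pairwise (· ≤ ·)) (k : Nat) :
    ((cnt (L.drop k) r : Int)) = max ((cnt L r : Int) - k) 0 := by
  have hds : (L.drop k).Pairwise (· ≤ ·) := List.Pairwise.sublist (List.drop_sublist k L) hs
  by_cases hk : k ≤ L.length
  · set c := cnt L r with hc
    set d := cnt (L.drop k) r with hd
    have hdlen : d ≤ L.length - k := by
      simpa using cnt_le_length (L.drop k) r
    have hclen := cnt_le_length L r
    -- transfer indices between L and L.drop k
    have key : ∀ t (ht : t < L.length - k), (t < d ↔ k + t < c) := by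
      intro t ht
      have ht' : t < (L.drop k).length := by simp [List.length_drop]; omega
      have h1 := cnt_iff (L.drop k) r hds t ht'
      have h2 := cnt_iff L r hs (k + t) (by omega)
      rw [List.getElem_drop] at h1
      omega
    rcases Nat.eq_zero_or_pos d with hd0 | hdpos
    · -- d = 0 : show c ≤ k
      have hck : c ≤ k := by
        by_contra hck
        rw [not_le] at hck
        have ht : c - k - 1 < L.length - k := by omega
        have := (key (c - k - 1) ht).mpr (by omega)
        omega
      rw [hd0]
      omega
    · have h1 : k + (d - 1) < c := (key (d - 1) (by omega)).mp (by omega)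
      have h2 : c ≤ k + d := by
        by_cases hdm : d < L.length - k
        · have := (key d hdm).mpr
          by_contra hcc
          rw [not_le] at hcc
          have := this (by omega)
          omega
        · omega
      omega
  · have hnil : L.drop k = [] := List.drop_eq_nil_of_le (by omega)
    have hclen := cnt_le_length L r
    have h0 : cnt (L.drop k) r = 0 := by rw [hnil]; rfl
    rw [h0]
    omega

theorem whileAdv_eq (L : List Int) (r : Int) (hs : L.Pairwise (· ≤ ·)) :
    ∀ j, j ≤ cnt L r → whileAdv L L.length r j = cnt L r := by
  intro j hj
  induction hn : L.length - j generalizing j with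
  | zero =>
    have hle := cnt_le_length L r
    have hj' : j = cnt L r := by omega
    rw [whileAdv]
    have hnc : ¬ (j < L.length ∧ L.getD j 0 ≤ r) := by
      rintro ⟨h1, h2⟩
      rw [List.getD_eq_getElem L 0 h1] at h2
      have := (cnt_iff L r hs j h1).mp h2
      omega
    rw [dif_neg hnc]
    omega
  | succ m ih =>
    rcases Nat.lt_or_ge j (cnt L r) with hlt | hge
    · have hjlen : j < L.length := lt_of_lt_of_le hlt (cnt_le_length L r)
      have hle : L[j] ≤ r := (cnt_iff L r hs j hjlen).mpr hlt
      rw [whileAdv]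
      have hcond : j < L.length ∧ L.getD j 0 ≤ r := by
        refine ⟨hjlen, ?_⟩
        rw [List.getD_eq_getElem L 0 hjlen]
        exact hle
      rw [dif_pos hcond]
      exact ih (j + 1) (by omega) (by omega)
    · have hj' : j = cnt L r := by omega
      rw [whileAdv]
      have hnc : ¬ (j < L.length ∧ L.getD j 0 ≤ r) := by
        rintro ⟨h1, h2⟩
        rw [List.getD_eq_getElem L 0 h1] at h2
        have := (cnt_iff L r hs j h1).mp h2
        omega
      rw [dif_neg hnc]
      omega

-- the summand both programs compute for sorted-position k with right end x
def term (L : List Int) (k : Int) (x : Int) : Int := max ((cnt L x : Int) - k - 1) 0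

theorem term_nonneg (L : List Int) (k x : Int) : 0 ≤ term L k x := le_max_right _ _

-- A's loop, normalised: early '-1' exit iff the whole sum exceeds 10e7
theorem aLoop_eq (L R : List Int) (hs : L.Pairwise (· ≤ ·)) (n : Nat) :
    ∀ i (total : Int), total ≤ 100000000 →
      aLoop L R n i total =
        (if total + ((List.range (n - i)).map
              (fun t => term L ((i + t : Nat) : Int) (R.getD (i + t) 0))).sum > 100000000
         then -1
         else total + ((List.range (n - i)).map
              (fun t => term L ((i + t : Nat) : Int) (R.getD (i + t) 0))).sum) := by
  intro i total htot
  induction hf : n - i generalizing i total with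
  | zero =>
    have hni : ¬ i < n := by omega
    rw [aLoop]
    simp [hni]
    omega
  | succ m ih =>
    have hin : i < n := by omega
    have hm : n - (i + 1) = m := by omega
    rw [aLoop]
    simp only [hin, if_true]
    have hslice : PySem.List.slice L (some ((i : Int) + 1)) none = L.drop (i + 1) := by
      have : ((i : Int) + 1) = ((i + 1 : Nat) : Int) := by push_cast; ring
      rw [this, PySem.List.slice_from_natCast]
    have hpos : (PySem.List.bisectRight (PySem.List.slice L (some ((i : Int) + 1)) none)
        (PySem.List.pyGetD R (i : Int) 0) : Int) = term L (i : Int) (R.getD i 0) := by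
      rw [hslice, PySem.List.pyGetD_natCast,
        bisect_eq_cnt _ _ (List.Pairwise.sublist (List.drop_sublist (i+1) L) hs),
        cnt_drop L _ hs (i + 1)]
      unfold term
      push_cast
      ring_nf
    -- split the range sum at its head
    have hsplit : ((List.range (m + 1)).map
          (fun t => term L ((i + t : Nat) : Int) (R.getD (i + t) 0))).sum
        = term L (i : Int) (R.getD i 0)
          + ((List.range m).map
              (fun t => term L ((i + 1 + t : Nat) : Int) (R.getD (i + 1 + t) 0))).sum := by
      rw [List.range_succ_eq_map]
      simp only [List.map_cons, List.map_map, List.sum_cons, Nat.add_zero]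
      congr 1
      refine congrArg List.sum (List.map_congr_left ?_)
      intro t _
      have he : i + (t + 1) = i + 1 + t := by omega
      simp only [Function.comp, Nat.succ_eq_add_one, he]
    have hrest : 0 ≤ ((List.range m).map
        (fun t => term L ((i + 1 + t : Nat) : Int) (R.getD (i + 1 + t) 0))).sum := by
      refine List.sum_nonneg ?_
      intro x hx
      rcases List.mem_map.mp hx with ⟨t, _, rfl⟩
      exact term_nonneg _ _ _
    have htermnn := term_nonneg L (i : Int) (R.getD i 0)
    rw [hpos, hsplit]
    by_cases hbig : total + term L (i : Int) (R.getD i 0) > 100000000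
    · rw [if_pos hbig, if_pos (by omega)]
    · rw [if_neg hbig]
      have hrec := ih (i + 1) (total + term L (i : Int) (R.getD i 0)) (by omega) (by omega)
      rw [hrec]
      split_ifs with h1 h2 <;> omega

-- B's sweep over the right-sorted pairs accumulates exactly the per-pair terms
theorem bFold_eq (L : List Int) (hs : L.Pairwise (· ≤ ·)) :
    ∀ (l : List (Int × Int)) (j : Nat) (total : Int),
      l.Pairwise (fun p q => p.2 ≤ q.2) → (∀ p ∈ l, j ≤ cnt L p.2) →
      (l.foldl (fun (st : Nat × Int) ir =>
          let j' := whileAdv L L.length ir.2 st.1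
          (j', st.2 + max ((j' : Int) - ir.1 - 1) 0)) (j, total)).2
        = total + (l.map (fun p => term L p.1 p.2)).sum := by
  intro l
  induction l with
  | nil => intro j total _ _; simp
  | cons p t ih =>
    intro j total hp hj
    rcases List.pairwise_cons.mp hp with ⟨hhead, ht⟩
    have hjp : j ≤ cnt L p.2 := hj p (List.mem_cons_self)
    have hadv : whileAdv L L.length p.2 j = cnt L p.2 := whileAdv_eq L p.2 hs j hjp
    simp only [List.foldl_cons, List.map_cons, List.sum_cons]
    rw [hadv]
    have hnext : ∀ q ∈ t, cnt L p.2 ≤ cnt L q.2 := fun q hq => cnt_mono L (hhead q hq)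
    rw [ih (cnt L p.2) (total + max ((cnt L p.2 : Int) - p.1 - 1) 0) ht hnext]
    unfold term
    ring

-- the enumerate-sum equals the range-indexed sum A's loop produces
theorem enum_sum_aux (L : List Int) : ∀ (R : List Int) (s : Nat),
    ((PySem.List.enumerate R (s : Int)).map (fun p => term L p.1 p.2)).sum
      = ((List.range R.length).map (fun t => term L ((s + t : Nat) : Int) (R.getD t 0))).sum := by
  intro R
  induction R with
  | nil => intro s; simp [PySem.List.enumerate_nil]
  | cons x xs ih =>
    intro s
    rw [PySem.List.enumerate_cons]
    simp only [List.map_cons, List.sum_cons, List.length_cons, List.range_succ_eq_map,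
      List.map_map]
    have hcast : (s : Int) + 1 = ((s + 1 : Nat) : Int) := by push_cast; ring
    rw [hcast, ih (s + 1)]
    congr 1
    refine congrArg List.sum (List.map_congr_left ?_)
    intro t _
    show term L ((s + 1 + t : Nat) : Int) (xs.getD t 0)
        = term L ((s + (t + 1) : Nat) : Int) ((x :: xs).getD (t + 1) 0)
    rw [List.getD_cons_succ]
    have he : ((s + 1 + t : Nat) : Int) = ((s + (t + 1) : Nat) : Int) := by push_cast; ring
    rw [he]

theorem enum_sum (L R : List Int) :
    ((PySem.List.enumerate R).map (fun p => term L p.1 p.2)).sum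
      = ((List.range R.length).map
          (fun t => term L ((0 + t : Nat) : Int) (R.getD (0 + t) 0))).sum := by
  have h := enum_sum_aux L R 0
  simp only [Nat.cast_zero] at h
  rw [h]
  refine congrArg List.sum (List.map_congr_left ?_)
  intro t _
  simp

-- ===== VERDICT (by name: the statement is the Claim_ definition above) =====
theorem solution_copy_spec : Claim_equal_solution_copy := by
  intro a _ _
  unfold Spec_solution_copy solution_copy solution_copy_alt
  set cuts := PySem.List.sorted
    ((PySem.List.enumerate a).map (fun cr => (cr.1 - cr.2, cr.1 + cr.2))) (fun p => p.1) with hcuts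
  set L := cuts.map Prod.fst with hL
  set R := cuts.map Prod.snd with hR
  have hLs : L.Pairwise (· ≤ ·) := by
    rw [hL, List.pairwise_map]
    exact PySem.List.sorted_pairwise _ _
  have hLlen : L.length = cuts.length := List.length_map ..
  have hRlen : R.length = cuts.length := List.length_map ..
  -- A's side
  rw [aLoop_eq L R hLs cuts.length 0 0 (by omega)]
  -- B's side: the fold over the right-sorted enumerate
  have hfst : (fun p : Int × Int => p.1) = Prod.fst := rfl
  have hsnd : (fun p : Int × Int => p.2) = Prod.snd := rfl
  have hordp : (PySem.List.sorted (PySem.List.enumerate R) (fun p => p.2)).Pairwise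
      (fun p q : Int × Int => p.2 ≤ q.2) := PySem.List.sorted_pairwise _ _
  have hperm : (PySem.List.sorted (PySem.List.enumerate R) (fun p => p.2)).Perm
      (PySem.List.enumerate R) := PySem.List.sorted_perm _ _ _
  have hfold := bFold_eq L hLs (PySem.List.sorted (PySem.List.enumerate R) (fun p => p.2))
      0 0 hordp (fun p _ => Nat.zero_le _)
  rw [hLlen] at hfold
  simp only [hfst, hsnd]
  rw [hfold]
  have hsum : ((PySem.List.sorted (PySem.List.enumerate R) (fun p => p.2)).map
      (fun p => term L p.1 p.2)).sum = ((PySem.List.enumerate R).map (fun p => term L p.1 p.2)).sum :=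
    (hperm.map _).sum_eq
  rw [hsum, enum_sum L R, hRlen]
  simp only [Nat.sub_zero, zero_add]
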